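-- pv_equiv track=rewrite | github.com/devs-aditya/hac | services/rca_service/app/main.py | _all_downstream
-- ===== SOURCE A (Python) =====
-- from collections import deque
--
-- DEPENDENTS_GRAPH: dict[str, list[str]] = {
--     "database-service": ["cache-service"],
--     "cache-service": ["api-service"],
--     "api-service": [],
-- }
--
-- def _all_downstream(service: str) -> list[str]:
--     order: list[str] = []
--     queue: deque[str] = deque(DEPENDENTS_GRAPH.get(service, []))
--     while queue:
--         current = queue.popleft()
--         order.append(current)
--         for child in DEPENDENTS_GRAPH.get(current, []):
--             queue.append(child)
--     return order
-- ===== SOURCE B (Python) =====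
-- DEPENDENTS_GRAPH: dict[str, list[str]] = {
--     "database-service": ["cache-service"],
--     "cache-service": ["api-service"],
--     "api-service": [],
-- }
--
-- def _all_downstream(service: str) -> list[str]:
--     order: list[str] = []
--     frontier: list[str] = DEPENDENTS_GRAPH.get(service, [])
--     while frontier:
--         order.extend(frontier)
--         frontier = [child for node in frontier
--                     for child in DEPENDENTS_GRAPH.get(node, [])]
--     return order
-- ===== Notes on version B (the rewrite author's own statement) =====
-- stated objective: alternative
-- what changed: Replaces the single-element deque loop with level-by-level (frontier) BFS: extend the output with a whole level at once, then compute the next level with a flat comprehension; no queue is maintained.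
import Mathlib
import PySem

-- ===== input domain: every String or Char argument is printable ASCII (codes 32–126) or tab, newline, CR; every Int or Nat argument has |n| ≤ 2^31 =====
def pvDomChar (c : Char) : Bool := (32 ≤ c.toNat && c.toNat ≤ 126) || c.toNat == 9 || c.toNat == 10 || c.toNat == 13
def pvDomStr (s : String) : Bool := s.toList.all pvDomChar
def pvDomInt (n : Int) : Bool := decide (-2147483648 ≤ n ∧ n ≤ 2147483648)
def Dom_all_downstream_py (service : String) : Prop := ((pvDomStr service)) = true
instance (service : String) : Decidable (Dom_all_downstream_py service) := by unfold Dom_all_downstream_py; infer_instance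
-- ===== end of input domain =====

-- B replaces A's one-node-at-a-time deque loop by level-by-level (frontier) BFS; objective: alternative decomposition, no speed claim.

-- DEPENDENTS_GRAPH (shared module constant, a literal dict)
def dependentsGraph : PySem.Dict String (List String) :=
  PySem.Dict.mk [("database-service", ["cache-service"]),
                 ("cache-service", ["api-service"]),
                 ("api-service", [])]

-- rank: a termination measure (each node's children are strictly smaller in rank)
def pvRank (s : String) : Nat :=
  if s = "database-service" then 3 else if s = "cache-service" then 2 else 1

theorem pvChildSum_lt (c : String) :
    ((dependentsGraph.getD c []).map pvRank).sum < pvRank c := by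
  unfold dependentsGraph pvRank
  simp only [PySem.Dict.getD_eq_get?_getD, PySem.Dict.get?_mk_cons, beq_iff_eq]
  by_cases h1 : "database-service" = c <;> by_cases h2 : "cache-service" = c <;>
    by_cases h3 : "api-service" = c <;> (try subst_vars) <;> simp_all [PySem.Dict.get?] <;>
    split_ifs <;> simp_all

theorem pvFlatSum_le (l : List String) :
    ((l.flatMap (fun n => dependentsGraph.getD n [])).map pvRank).sum ≤ (l.map pvRank).sum := by
  induction l with
  | nil => simp
  | cons a t ih =>
    simp only [List.flatMap_cons, List.map_append, List.sum_append, List.map_cons, List.sum_cons]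
    have := pvChildSum_lt a
    omega

-- ===== PORT A =====
-- while queue: current = queue.popleft(); order.append(current); queue.extend(graph.get(current, []))
def pvBfsA (order : List String) (queue : List String) : List String :=
  match queue with
  | [] => order
  | c :: q => pvBfsA (order ++ [c]) (q ++ dependentsGraph.getD c [])
termination_by (queue.map pvRank).sum
decreasing_by
  simp only [List.map_append, List.sum_append, List.map_cons, List.sum_cons]
  have := pvChildSum_lt c
  omega

def all_downstream_py (service : String) : List String :=
  pvBfsA [] (dependentsGraph.getD service [])

-- ===== PORT B =====
-- while frontier: order.extend(frontier); frontier = [child for node in frontier for child in graph.get(node, [])]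
def pvBfsB (order : List String) (frontier : List String) : List String :=
  match frontier with
  | [] => order
  | c :: q => pvBfsB (order ++ (c :: q)) ((c :: q).flatMap (fun n => dependentsGraph.getD n []))
termination_by (frontier.map pvRank).sum
decreasing_by
  have h1 := pvFlatSum_le q
  have h2 := pvChildSum_lt c
  simp only [List.flatMap_cons, List.map_append, List.sum_append, List.map_cons,
             List.sum_cons] at *
  omega

def all_downstream_py_alt (service : String) : List String :=
  pvBfsB [] (dependentsGraph.getD service [])

-- ===== PRECONDITION & SPEC =====
def Spec_all_downstream_py (service : String) (out : List String) : Prop := out = all_downstream_py_alt service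
instance (service : String) (out : List String) : Decidable (Spec_all_downstream_py service out) := by unfold Spec_all_downstream_py; infer_instance

-- ===== CLAIM (what is proved, stated in full; the proofs are below) =====
def Claim_equal_all_downstream_py : Prop := ∀ (service : String), Dom_all_downstream_py service → Spec_all_downstream_py service (all_downstream_py service)

-- ===== LEMMAS AND PROOFS =====
theorem depGet_cases (s : String) :
    dependentsGraph.getD s [] = if s = "database-service" then ["cache-service"]
      else if s = "cache-service" then ["api-service"] else [] := by
  unfold dependentsGraph
  simp only [PySem.Dict.getD_eq_get?_getD, PySem.Dict.get?_mk_cons, beq_iff_eq]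
  by_cases h1 : s = "database-service" <;> by_cases h2 : s = "cache-service" <;>
    by_cases h3 : s = "api-service" <;> (try subst_vars) <;> simp_all [PySem.Dict.get?] <;>
    split_ifs <;> simp_all [eq_comm]

theorem pvBfsA_db : pvBfsA [] ["cache-service"] = ["cache-service", "api-service"] := by
  simp [pvBfsA.eq_def, depGet_cases]

theorem pvBfsB_db : pvBfsB [] ["cache-service"] = ["cache-service", "api-service"] := by
  simp [pvBfsB.eq_def, depGet_cases]

theorem pvBfsA_cache : pvBfsA [] ["api-service"] = ["api-service"] := by
  simp [pvBfsA.eq_def, depGet_cases]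

theorem pvBfsB_cache : pvBfsB [] ["api-service"] = ["api-service"] := by
  simp [pvBfsB.eq_def, depGet_cases]

-- ===== VERDICT (by name: the statement is the Claim_ definition above) =====
theorem all_downstream_py_spec : Claim_equal_all_downstream_py := by
  intro s _
  unfold Spec_all_downstream_py all_downstream_py all_downstream_py_alt
  rw [depGet_cases s]
  split_ifs
  · rw [pvBfsA_db, pvBfsB_db]
  · rw [pvBfsA_cache, pvBfsB_cache]
  · simp [pvBfsA.eq_def, pvBfsB.eq_def]
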